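-- pv_equiv track=rewrite | github.com/3RFUNn/Artificial-Intelligence-Course | HW2/Annealing.py | check_satisfation
-- ===== SOURCE A (Python) =====
-- from copy import deepcopy
--
-- def check_satisfation(clause, state):
--     clauses = deepcopy(clause)
--
--     for l in state:
--         i = 0
--         while i < len(clauses):
--             if l in clauses[i]:
--                 clauses.remove(clauses[i])
--             else:
--                 i = i + 1
--     return len(clauses)
-- ===== SOURCE B (Python) =====
-- def check_satisfation(clause, state):
--     # Inverted index: literal -> set of indices of clauses containing it.
--     index = {}
--     for i, c in enumerate(clause):
--         for l in c:
--             index[l] = index.get(l, set()) | {i}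
--     satisfied = set()
--     for l in state:
--         satisfied = satisfied | index.get(l, set())
--     return len(clause) - len(satisfied)
-- ===== Notes on version B (the rewrite author's own statement) =====
-- stated objective: faster
-- what changed: Replaces the per-literal scan-and-remove loops over a deep copy of the clause list by a two-phase inverted index: build a dict from literal to the set of clause indices containing it, union the index entries of the state literals into one satisfied-index set, and return len(clause) minus its size.
import Mathlib
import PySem

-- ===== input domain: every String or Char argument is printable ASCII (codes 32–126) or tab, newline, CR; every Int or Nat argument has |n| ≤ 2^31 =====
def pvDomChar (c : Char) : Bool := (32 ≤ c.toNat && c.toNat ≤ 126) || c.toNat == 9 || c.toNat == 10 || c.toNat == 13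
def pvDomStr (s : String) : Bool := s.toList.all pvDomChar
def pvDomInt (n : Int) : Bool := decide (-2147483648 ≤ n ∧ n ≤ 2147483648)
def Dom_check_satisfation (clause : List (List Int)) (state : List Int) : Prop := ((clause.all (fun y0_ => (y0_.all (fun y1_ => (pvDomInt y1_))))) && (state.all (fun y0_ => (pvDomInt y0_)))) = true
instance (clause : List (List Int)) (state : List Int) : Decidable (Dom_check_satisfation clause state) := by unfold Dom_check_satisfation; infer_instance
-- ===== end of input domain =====

-- B replaces A's per-literal scan-and-remove over a copied clause list by an inverted index
-- (literal -> set of clause indices) unioned over the state literals; objective: faster.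

-- ===== PORT A =====
-- inner 'while i < len(clauses)' loop of A; 'clauses.remove(clauses[i])' removes the FIRST equal
-- clause (PySem.List.remove?; never none here since clauses[i] is a member, so getD is exact)
def pvAWhile (l : Int) (cls : List (List Int)) (i : Nat) : List (List Int) :=
  if h : i < cls.length then
    let c := cls[i]
    if l ∈ c then pvAWhile l ((PySem.List.remove? cls c).getD cls) i
    else pvAWhile l cls (i + 1)
  else cls
termination_by cls.length - i
decreasing_by
  · have hc : cls[i] ∈ cls := List.getElem_mem h
    have h1 := PySem.List.remove?_eq_some_erase cls _ hc
    have h2 := List.length_erase_of_mem hc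
    simp only [h1, Option.getD_some]
    omega
  · omega

def check_satisfation (clause : List (List Int)) (state : List Int) : Int :=
  let clauses := clause  -- clauses = deepcopy(clause)
  ((state.foldl (fun cls l => pvAWhile l cls 0) clauses).length : Int)

-- ===== PORT B =====
-- index = {}; for i, c in enumerate(clause): for l in c: index[l] = index.get(l, set()) | {i}
def pvBIndex (clause : List (List Int)) : PySem.Dict Int (PySem.Set Int) :=
  (PySem.List.enumerate clause 0).foldl
    (fun d p => p.2.foldl (fun d l => d.modify l PySem.Set.empty (fun s => PySem.Set.add s p.1)) d)
    PySem.Dict.empty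

def check_satisfation_alt (clause : List (List Int)) (state : List Int) : Int :=
  let index := pvBIndex clause
  let satisfied := state.foldl (fun s l => PySem.Set.union s (index.getD l PySem.Set.empty)) PySem.Set.empty
  PySem.List.len clause - PySem.Set.len satisfied

-- ===== PRECONDITION & SPEC =====
def Spec_check_satisfation (clause : List (List Int)) (state : List Int) (out : Int) : Prop := out = check_satisfation_alt clause state
instance (clause : List (List Int)) (state : List Int) (out : Int) : Decidable (Spec_check_satisfation clause state out) := by unfold Spec_check_satisfation; infer_instance

-- ===== CLAIM (what is proved, stated in full; the proofs are below) =====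
def Claim_equal_check_satisfation : Prop := ∀ (clause : List (List Int)) (state : List Int), Dom_check_satisfation clause state → Spec_check_satisfation clause state (check_satisfation clause state)

-- ===== LEMMAS AND PROOFS =====

-- A side: with the prefix before i free of l, 'clauses.remove(clauses[i])' deletes exactly index i
lemma pvRemoveAt (l : Int) (cls : List (List Int)) (i : Nat) (h : i < cls.length)
    (hpre : ∀ c ∈ cls.take i, l ∉ c) (hl : l ∈ cls[i]) :
    PySem.List.remove? cls cls[i] = some (cls.take i ++ cls.drop (i + 1)) := by
  induction cls generalizing i with
  | nil => simp at h
  | cons x xs ih =>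
    cases i with
    | zero => simp [PySem.List.remove?_cons_self]
    | succ i =>
      have hx : l ∉ x := hpre x (by simp)
      have hi : i < xs.length := by simpa using h
      simp only [List.getElem_cons_succ] at hl ⊢
      have hne : x ≠ xs[i]'hi := fun he => hx (he ▸ hl)
      rw [PySem.List.remove?_cons_of_ne xs hne,
        ih i (by simpa using h) (fun c hc => hpre c (by simp [List.take_succ_cons]; exact Or.inr hc)) hl]
      simp

-- A side: the while loop keeps the l-free prefix and filters the rest
lemma pvAWhile_eq_filter (l : Int) (cls : List (List Int)) (i : Nat)
    (hpre : ∀ c ∈ cls.take i, l ∉ c) :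
    pvAWhile l cls i = cls.take i ++ (cls.drop i).filter (fun c => decide (l ∉ c)) := by
  generalize hm : cls.length - i = m
  induction m using Nat.strong_induction_on generalizing cls i with
  | _ m ih =>
  rw [pvAWhile]
  by_cases h : i < cls.length
  · rw [dif_pos h]
    by_cases hl : l ∈ cls[i]
    · rw [if_pos hl, pvRemoveAt l cls i h hpre hl]
      set cls' := cls.take i ++ cls.drop (i + 1) with hc'
      have hlen : cls'.length = cls.length - 1 := by
        simp [hc', List.length_take, List.length_drop]; omega
      have htk : cls'.take i = cls.take i := by
        rw [hc', List.take_append]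
        simp [Nat.min_eq_left (Nat.le_of_lt h)]
      have hdr : cls'.drop i = cls.drop (i + 1) := by
        rw [hc', List.drop_append_of_le_length (by simp [List.length_take]; omega)]
        simp [Nat.min_eq_left (Nat.le_of_lt h)]
      have := ih (cls.length - 1 - i) (by omega) cls' i (by rw [htk]; exact hpre) (by omega)
      simp only [Option.getD_some]
      rw [this, htk, hdr]
      have : cls.drop i = cls[i] :: cls.drop (i + 1) := List.drop_eq_getElem_cons h
      rw [this, List.filter_cons, if_neg (by simp [hl])]
    · rw [if_neg hl]
      have htk : cls.take (i+1) = cls.take i ++ [cls[i]] := by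
        rw [List.take_add_one]; simp [List.getElem?_eq_getElem h]
      have := ih (cls.length - (i+1)) (by omega) cls (i+1)
        (by rw [htk]; intro c hc; rcases List.mem_append.1 hc with h1 | h1
            · exact hpre c h1
            · simp at h1; subst h1; exact hl) rfl
      rw [this, htk]
      have : cls.drop i = cls[i] :: cls.drop (i + 1) := List.drop_eq_getElem_cons h
      rw [this, List.filter_cons, if_pos (by simp [hl]), List.append_assoc]
      simp
  · rw [dif_neg h]
    rw [List.take_of_length_le (by omega), List.drop_of_length_le (by omega)]
    simp

-- A side: the whole outer loop is one filter over the original clause list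
lemma pvA_foldl_filter (state : List Int) (cls : List (List Int)) :
    state.foldl (fun cls l => pvAWhile l cls 0) cls
      = cls.filter (fun c => decide (∀ l ∈ state, l ∉ c)) := by
  induction state generalizing cls with
  | nil => simp
  | cons x state ih =>
    rw [List.foldl_cons, ih, pvAWhile_eq_filter x cls 0 (by simp), List.take_zero,
      List.drop_zero, List.nil_append, List.filter_filter]
    apply List.filter_congr
    intro c _
    simp [Bool.and_comm]

-- B side: effect of the inner literal loop on one index entry
lemma pvBInner (c : List Int) (j : Int) (d : PySem.Dict Int (PySem.Set Int)) (l : Int) :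
    (c.foldl (fun d l => d.modify l PySem.Set.empty (fun s => PySem.Set.add s j)) d).getD l PySem.Set.empty
      = if l ∈ c then (d.getD l PySem.Set.empty).add j else d.getD l PySem.Set.empty := by
  induction c generalizing d with
  | nil => simp
  | cons x c ih =>
    rw [List.foldl_cons, ih]
    by_cases hx : l = x
    · subst hx
      rw [PySem.Dict.getD_modify_self]
      by_cases hc : l ∈ c
      · simp only [hc, List.mem_cons, true_or, if_true]
        exact PySem.Set.add_of_mem (by simp [PySem.Set.mem_add])
      · simp [hc]
    · rw [PySem.Dict.getD_modify_of_ne _ _ _ hx]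
      by_cases hc : l ∈ c <;> simp [hc, hx]

-- B side: membership in an entry of the inverted index
lemma pvBOuter (cs : List (List Int)) (s : Int) (d : PySem.Dict Int (PySem.Set Int)) (l i : Int) :
    i ∈ ((PySem.List.enumerate cs s).foldl
        (fun d p => p.2.foldl (fun d l => d.modify l PySem.Set.empty (fun s => PySem.Set.add s p.1)) d) d).getD l PySem.Set.empty
      ↔ i ∈ d.getD l PySem.Set.empty
        ∨ ∃ j : Nat, j < cs.length ∧ i = s + j ∧ l ∈ cs.getD j [] := by
  induction cs generalizing s d with
  | nil => simp [PySem.List.enumerate_nil]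
  | cons c cs ih =>
    rw [PySem.List.enumerate_cons, List.foldl_cons, ih]
    have hin := pvBInner c s d l
    constructor
    · rintro (hmem | ⟨j, hj, rfl, hl⟩)
      · rw [hin] at hmem
        by_cases hc : l ∈ c
        · rw [if_pos hc, PySem.Set.mem_add] at hmem
          rcases hmem with hmem | rfl
          · exact Or.inl hmem
          · exact Or.inr ⟨0, by simp, by simp, by simpa using hc⟩
        · rw [if_neg hc] at hmem; exact Or.inl hmem
      · exact Or.inr ⟨j + 1, by simpa using hj, by push_cast; ring, by simpa using hl⟩
    · rintro (hmem | ⟨j, hj, rfl, hl⟩)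
      · left; rw [hin]
        by_cases hc : l ∈ c
        · rw [if_pos hc, PySem.Set.mem_add]; exact Or.inl hmem
        · rwa [if_neg hc]
      · cases j with
        | zero => left; rw [hin, if_pos (by simpa using hl), PySem.Set.mem_add]; right; simp
        | succ j =>
          right
          exact ⟨j, by simpa using hj, by push_cast; ring, by simpa using hl⟩

-- B side: membership in the accumulated satisfied-index set
lemma pvBSat_mem (state : List Int) (idx : PySem.Dict Int (PySem.Set Int)) (s0 : PySem.Set Int) (i : Int) :
    i ∈ state.foldl (fun s l => PySem.Set.union s (idx.getD l PySem.Set.empty)) s0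
      ↔ i ∈ s0 ∨ ∃ l ∈ state, i ∈ idx.getD l PySem.Set.empty := by
  induction state generalizing s0 with
  | nil => simp
  | cons x state ih =>
    rw [List.foldl_cons, ih, PySem.Set.mem_union]
    constructor
    · rintro ((h | h) | ⟨l, hl, h⟩)
      · exact Or.inl h
      · exact Or.inr ⟨x, by simp, h⟩
      · exact Or.inr ⟨l, by simp [hl], h⟩
    · rintro (h | ⟨l, hl, h⟩)
      · exact Or.inl (Or.inl h)
      · rcases List.mem_cons.1 hl with rfl | hl
        · exact Or.inl (Or.inr h)
        · exact Or.inr ⟨l, hl, h⟩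

lemma pvBSat_nodup (state : List Int) (idx : PySem.Dict Int (PySem.Set Int)) (s0 : PySem.Set Int)
    (h0 : s0.Nodup) :
    (state.foldl (fun s l => PySem.Set.union s (idx.getD l PySem.Set.empty)) s0).Nodup := by
  induction state generalizing s0 with
  | nil => exact h0
  | cons x state ih => exact ih _ (PySem.Set.nodup_union _ _ h0)

-- index-wise count equals element-wise count
lemma pvMapRangeGetD (xs : List (List Int)) :
    (List.range xs.length).map (fun i => xs.getD i []) = xs := by
  apply List.ext_getElem (by simp)
  intro i h1 h2
  simp [List.getD_eq_getElem?_getD, List.getElem?_eq_getElem h2]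

lemma pvCountSplit (p : List Int → Bool) (l : List (List Int)) :
    l.length = l.countP p + l.countP (fun a => !p a) := by
  induction l with
  | nil => simp
  | cons x l ih => by_cases h : p x <;> simp [h, ih] <;> omega

-- ===== VERDICT (by name: the statement is the Claim_ definition above) =====
theorem check_satisfation_spec : Claim_equal_check_satisfation := by
  intro clause state _
  show _ = _
  unfold check_satisfation check_satisfation_alt
  simp only []
  rw [pvA_foldl_filter]
  set q : List Int → Bool := fun c => decide (∃ l ∈ state, l ∈ c) with hq
  set sat := state.foldl
      (fun s l => PySem.Set.union s ((pvBIndex clause).getD l PySem.Set.empty)) PySem.Set.empty with hsat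
  -- the satisfied set is a permutation of the q-satisfying indices of clause
  set T : List Int := List.map (fun j : Nat => (j : Int))
      ((List.range clause.length).filter (fun j => q (clause.getD j []))) with hT
  have hmem : ∀ i : Int, i ∈ sat ↔ i ∈ T := by
    intro i
    rw [hsat, pvBSat_mem, hT]
    unfold pvBIndex
    simp only [pvBOuter, List.mem_map, List.mem_filter, List.mem_range]
    constructor
    · rintro (h | ⟨l, hl, h | ⟨j, hj, rfl, hlj⟩⟩)
      · simp [PySem.Set.empty] at h
      · simp [PySem.Dict.empty, PySem.Dict.getD, PySem.Dict.get?, PySem.Set.empty] at h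
      · exact ⟨j, ⟨hj, by rw [hq]; simp only [decide_eq_true_iff]; exact ⟨l, hl, hlj⟩⟩, by omega⟩
    · rintro ⟨j, ⟨hj, hqj⟩, rfl⟩
      rw [hq] at hqj; simp only [decide_eq_true_iff] at hqj
      obtain ⟨l, hl, hlj⟩ := hqj
      exact Or.inr ⟨l, hl, Or.inr ⟨j, hj, by omega, hlj⟩⟩
  have hnodup : sat.Nodup := pvBSat_nodup _ _ _ (by simp [PySem.Set.empty])
  have hnodupT : T.Nodup := by
    rw [hT]
    exact (List.nodup_range.filter _).map (fun a b h => by exact_mod_cast h)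
  have hperm := (List.perm_ext_iff_of_nodup hnodup hnodupT).2 hmem
  have hlen : sat.length = (List.range clause.length).countP (fun j => q (clause.getD j [])) := by
    rw [hperm.length_eq, hT, List.length_map, List.countP_eq_length_filter]
  -- index-wise count to element-wise count
  have hcount : (List.range clause.length).countP (fun j => q (clause.getD j [])) = clause.countP q := by
    conv_rhs => rw [← pvMapRangeGetD clause]
    rw [List.countP_map]
    rfl
  -- A's filter counts the complement of q
  have hA : (clause.filter (fun c => decide (∀ l ∈ state, l ∉ c))).length = clause.countP (fun c => !q c) := by
    rw [← List.countP_eq_length_filter]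
    apply List.countP_congr
    intro c _
    by_cases h : ∃ l ∈ state, l ∈ c
    · have h2 : ¬ ∀ l ∈ state, l ∉ c := by
        rcases h with ⟨l, hl, hlc⟩; intro hall; exact hall l hl hlc
      simp [hq, h, h2]
    · have h2 : ∀ l ∈ state, l ∉ c := by
        intro l hl hlc; exact h ⟨l, hl, hlc⟩
      simp only [hq, h, decide_false, Bool.not_false, decide_eq_true_eq]
      exact iff_true_intro h2
  have hsplit := pvCountSplit q clause
  rw [hA]
  simp only [PySem.Set.len, PySem.List.len_eq, hlen, hcount]
  omega
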